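-- pv_equiv track=rewrite | github.com/fallon3d/FF_DA_2025 | draft_assistant/app.py | _make_base_plan
-- ===== SOURCE A (Python) =====
-- from typing import Dict, List, Tuple, Optional
--
-- def _make_base_plan(name: str, rnd: int, total_rounds: int, my_counts: Dict[str,int]) -> Dict[int, str]:
--     end_round = min(total_rounds, rnd + 5)
--     plan: Dict[int, str] = {}
--     for i in range(rnd, end_round + 1):
--         if name == "Zero RB":
--             plan[i] = "WR/TE" if i <= rnd+3 else ("RB upside" if i <= rnd+5 else "QB")
--         elif name == "Modified Zero RB":
--             plan[i] = "WR/TE" if i <= rnd+2 else ("RB upside" if i <= rnd+5 else "QB")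
--         elif name == "Hero RB":
--             plan[i] = "RB" if i == rnd and my_counts.get("RB",0) < 1 else ("WR/TE" if i <= rnd+3 else "QB")
--         elif name == "Robust RB":
--             plan[i] = "RB" if (i in (rnd, rnd+1) and my_counts.get("RB",0) < 2) else ("WR/TE" if i <= rnd+4 else "QB")
--         elif name == "Hyper-Fragile RB":
--             if my_counts.get("RB",0) < 2 and i <= rnd+2: plan[i] = "RB"
--             else: plan[i] = "WR/TE"
--         elif name == "WR-Heavy":
--             plan[i] = "WR" if i <= rnd+2 else ("TE/RB" if i <= rnd+4 else "QB")
--         elif name == "Pocket QB":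
--             plan[i] = "WR/TE/RB" if i <= rnd+6 else "QB"
--         elif name == "Bimodal RB":
--             plan[i] = "WR/TE" if i <= rnd+2 else ("RB" if i in (rnd+3, rnd+4) else "WR/TE")
--         else:
--             plan[i] = "Best Value (RB/WR/TE)" if i <= rnd+3 else "QB"
--     return plan
-- ===== SOURCE B (Python) =====
-- def _make_base_plan(name: str, rnd: int, total_rounds: int, my_counts: dict) -> dict:
--     # Table-driven: one fixed 6-slot label table per strategy (indexed by offset from rnd),
--     # selected once, then laid over the round window.
--     rb = my_counts.get("RB", 0)
--     tables = {
--         "Zero RB":          ["WR/TE"] * 4 + ["RB upside"] * 2,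
--         "Modified Zero RB": ["WR/TE"] * 3 + ["RB upside"] * 3,
--         "Hero RB":          (["RB"] if rb < 1 else ["WR/TE"]) + ["WR/TE"] * 3 + ["QB"] * 2,
--         "Robust RB":        (["RB", "RB"] if rb < 2 else ["WR/TE", "WR/TE"]) + ["WR/TE"] * 3 + ["QB"],
--         "Hyper-Fragile RB": (["RB"] * 3 if rb < 2 else ["WR/TE"] * 3) + ["WR/TE"] * 3,
--         "WR-Heavy":         ["WR"] * 3 + ["TE/RB"] * 2 + ["QB"],
--         "Pocket QB":        ["WR/TE/RB"] * 6,
--         "Bimodal RB":       ["WR/TE"] * 3 + ["RB"] * 2 + ["WR/TE"],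
--     }
--     labels = tables.get(name, ["Best Value (RB/WR/TE)"] * 4 + ["QB"] * 2)
--     end_round = min(total_rounds, rnd + 5)
--     return {rnd + d: labels[d] for d in range(end_round - rnd + 1)}
-- ===== Notes on version B (the rewrite author's own statement) =====
-- stated objective: simpler
-- what changed: Replaces the per-iteration 9-way branch chain with a fixed 6-slot label table per strategy, selected once by dict lookup and laid over the round window by offset.
import Mathlib
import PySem

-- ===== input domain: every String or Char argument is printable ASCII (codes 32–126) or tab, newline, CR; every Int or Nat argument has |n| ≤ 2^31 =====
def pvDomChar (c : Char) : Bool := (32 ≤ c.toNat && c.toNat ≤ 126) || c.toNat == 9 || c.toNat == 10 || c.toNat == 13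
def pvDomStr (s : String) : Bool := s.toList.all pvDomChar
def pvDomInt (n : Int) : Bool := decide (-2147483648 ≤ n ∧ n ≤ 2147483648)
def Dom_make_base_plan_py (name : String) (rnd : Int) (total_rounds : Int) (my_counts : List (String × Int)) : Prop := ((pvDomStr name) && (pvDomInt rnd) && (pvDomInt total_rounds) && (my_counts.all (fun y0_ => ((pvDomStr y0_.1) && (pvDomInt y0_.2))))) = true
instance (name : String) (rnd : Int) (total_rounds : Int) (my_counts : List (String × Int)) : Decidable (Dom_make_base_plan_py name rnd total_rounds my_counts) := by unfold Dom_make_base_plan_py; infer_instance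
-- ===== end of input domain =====

-- B replaces A's per-iteration 9-way branch chain by a fixed 6-slot label table per strategy,
-- chosen once by dict lookup and laid over the round window by offset (objective: simpler).

-- ===== PORT A =====
def make_base_plan_py (name : String) (rnd : Int) (total_rounds : Int) (my_counts : List (String × Int)) : List (Int × String) :=
  let end_round := min total_rounds (rnd + 5)
  let plan : PySem.Dict Int String :=
    (PySem.List.pyRange rnd (end_round + 1) 1).foldl (fun plan i =>
      if name = "Zero RB" then
        plan.insert i (if i ≤ rnd + 3 then "WR/TE" else if i ≤ rnd + 5 then "RB upside" else "QB")
      else if name = "Modified Zero RB" then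
        plan.insert i (if i ≤ rnd + 2 then "WR/TE" else if i ≤ rnd + 5 then "RB upside" else "QB")
      else if name = "Hero RB" then
        plan.insert i (if i = rnd ∧ (PySem.Dict.mk my_counts).getD "RB" 0 < 1 then "RB"
                       else if i ≤ rnd + 3 then "WR/TE" else "QB")
      else if name = "Robust RB" then
        plan.insert i (if (i = rnd ∨ i = rnd + 1) ∧ (PySem.Dict.mk my_counts).getD "RB" 0 < 2 then "RB"
                       else if i ≤ rnd + 4 then "WR/TE" else "QB")
      else if name = "Hyper-Fragile RB" then
        (if (PySem.Dict.mk my_counts).getD "RB" 0 < 2 ∧ i ≤ rnd + 2 then plan.insert i "RB"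
         else plan.insert i "WR/TE")
      else if name = "WR-Heavy" then
        plan.insert i (if i ≤ rnd + 2 then "WR" else if i ≤ rnd + 4 then "TE/RB" else "QB")
      else if name = "Pocket QB" then
        plan.insert i (if i ≤ rnd + 6 then "WR/TE/RB" else "QB")
      else if name = "Bimodal RB" then
        plan.insert i (if i ≤ rnd + 2 then "WR/TE" else if i = rnd + 3 ∨ i = rnd + 4 then "RB" else "WR/TE")
      else
        plan.insert i (if i ≤ rnd + 3 then "Best Value (RB/WR/TE)" else "QB"))
      PySem.Dict.empty
  plan.items

-- ===== PORT B =====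
-- labels[d] in Source B is an in-range indexing (0 ≤ d ≤ 5 < 6 = len); pyGetD with a dummy default is exact there.
def make_base_plan_py_alt (name : String) (rnd : Int) (total_rounds : Int) (my_counts : List (String × Int)) : List (Int × String) :=
  let rb := (PySem.Dict.mk my_counts).getD "RB" 0
  let tables : PySem.Dict String (List String) := PySem.Dict.ofList
    [ ("Zero RB",          List.replicate 4 "WR/TE" ++ List.replicate 2 "RB upside")
    , ("Modified Zero RB", List.replicate 3 "WR/TE" ++ List.replicate 3 "RB upside")
    , ("Hero RB",          (if rb < 1 then ["RB"] else ["WR/TE"]) ++ List.replicate 3 "WR/TE" ++ List.replicate 2 "QB")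
    , ("Robust RB",        (if rb < 2 then ["RB", "RB"] else ["WR/TE", "WR/TE"]) ++ List.replicate 3 "WR/TE" ++ ["QB"])
    , ("Hyper-Fragile RB", (if rb < 2 then List.replicate 3 "RB" else List.replicate 3 "WR/TE") ++ List.replicate 3 "WR/TE")
    , ("WR-Heavy",         List.replicate 3 "WR" ++ List.replicate 2 "TE/RB" ++ ["QB"])
    , ("Pocket QB",        List.replicate 6 "WR/TE/RB")
    , ("Bimodal RB",       List.replicate 3 "WR/TE" ++ List.replicate 2 "RB" ++ ["WR/TE"]) ]
  let labels := tables.getD name (List.replicate 4 "Best Value (RB/WR/TE)" ++ List.replicate 2 "QB")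
  let end_round := min total_rounds (rnd + 5)
  ((PySem.List.pyRange 0 (end_round - rnd + 1) 1).foldl (fun plan d =>
      plan.insert (rnd + d) (PySem.List.pyGetD labels d "")) PySem.Dict.empty).items

-- ===== PRECONDITION & SPEC =====
def Spec_make_base_plan_py (name : String) (rnd : Int) (total_rounds : Int) (my_counts : List (String × Int)) (out : List (Int × String)) : Prop := out = make_base_plan_py_alt name rnd total_rounds my_counts
instance (name : String) (rnd : Int) (total_rounds : Int) (my_counts : List (String × Int)) (out : List (Int × String)) : Decidable (Spec_make_base_plan_py name rnd total_rounds my_counts out) := by unfold Spec_make_base_plan_py; infer_instance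

-- ===== CLAIM (what is proved, stated in full; the proofs are below) =====
def Claim_equal_make_base_plan_py : Prop := ∀ (name : String) (rnd : Int) (total_rounds : Int) (my_counts : List (String × Int)), Dom_make_base_plan_py name rnd total_rounds my_counts → Spec_make_base_plan_py name rnd total_rounds my_counts (make_base_plan_py name rnd total_rounds my_counts)

-- ===== LEMMAS AND PROOFS =====
set_option maxHeartbeats 1600000

-- The label A's loop body assigns at round i (the inserts pulled out of the branch chain).
def pvLabelA (name : String) (rnd rb i : Int) : String :=
  if name = "Zero RB" then (if i ≤ rnd + 3 then "WR/TE" else if i ≤ rnd + 5 then "RB upside" else "QB")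
  else if name = "Modified Zero RB" then (if i ≤ rnd + 2 then "WR/TE" else if i ≤ rnd + 5 then "RB upside" else "QB")
  else if name = "Hero RB" then (if i = rnd ∧ rb < 1 then "RB" else if i ≤ rnd + 3 then "WR/TE" else "QB")
  else if name = "Robust RB" then (if (i = rnd ∨ i = rnd + 1) ∧ rb < 2 then "RB" else if i ≤ rnd + 4 then "WR/TE" else "QB")
  else if name = "Hyper-Fragile RB" then (if rb < 2 ∧ i ≤ rnd + 2 then "RB" else "WR/TE")
  else if name = "WR-Heavy" then (if i ≤ rnd + 2 then "WR" else if i ≤ rnd + 4 then "TE/RB" else "QB")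
  else if name = "Pocket QB" then (if i ≤ rnd + 6 then "WR/TE/RB" else "QB")
  else if name = "Bimodal RB" then (if i ≤ rnd + 2 then "WR/TE" else if i = rnd + 3 ∨ i = rnd + 4 then "RB" else "WR/TE")
  else (if i ≤ rnd + 3 then "Best Value (RB/WR/TE)" else "QB")

-- B's selected table, written as defs so the proofs can name it.
def pvLabelsB (name : String) (rb : Int) : List String :=
  (PySem.Dict.ofList
    [ ("Zero RB",          List.replicate 4 "WR/TE" ++ List.replicate 2 "RB upside")
    , ("Modified Zero RB", List.replicate 3 "WR/TE" ++ List.replicate 3 "RB upside")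
    , ("Hero RB",          (if rb < 1 then ["RB"] else ["WR/TE"]) ++ List.replicate 3 "WR/TE" ++ List.replicate 2 "QB")
    , ("Robust RB",        (if rb < 2 then ["RB", "RB"] else ["WR/TE", "WR/TE"]) ++ List.replicate 3 "WR/TE" ++ ["QB"])
    , ("Hyper-Fragile RB", (if rb < 2 then List.replicate 3 "RB" else List.replicate 3 "WR/TE") ++ List.replicate 3 "WR/TE")
    , ("WR-Heavy",         List.replicate 3 "WR" ++ List.replicate 2 "TE/RB" ++ ["QB"])
    , ("Pocket QB",        List.replicate 6 "WR/TE/RB")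
    , ("Bimodal RB",       List.replicate 3 "WR/TE" ++ List.replicate 2 "RB" ++ ["WR/TE"]) ]).getD name
    (List.replicate 4 "Best Value (RB/WR/TE)" ++ List.replicate 2 "QB")

lemma pvLabelsB_eq (name : String) (rb : Int) :
    pvLabelsB name rb =
      (if name = "Zero RB" then List.replicate 4 "WR/TE" ++ List.replicate 2 "RB upside"
       else if name = "Modified Zero RB" then List.replicate 3 "WR/TE" ++ List.replicate 3 "RB upside"
       else if name = "Hero RB" then (if rb < 1 then ["RB"] else ["WR/TE"]) ++ List.replicate 3 "WR/TE" ++ List.replicate 2 "QB"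
       else if name = "Robust RB" then (if rb < 2 then ["RB", "RB"] else ["WR/TE", "WR/TE"]) ++ List.replicate 3 "WR/TE" ++ ["QB"]
       else if name = "Hyper-Fragile RB" then (if rb < 2 then List.replicate 3 "RB" else List.replicate 3 "WR/TE") ++ List.replicate 3 "WR/TE"
       else if name = "WR-Heavy" then List.replicate 3 "WR" ++ List.replicate 2 "TE/RB" ++ ["QB"]
       else if name = "Pocket QB" then List.replicate 6 "WR/TE/RB"
       else if name = "Bimodal RB" then List.replicate 3 "WR/TE" ++ List.replicate 2 "RB" ++ ["WR/TE"]
       else List.replicate 4 "Best Value (RB/WR/TE)" ++ List.replicate 2 "QB") := by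
  by_cases h1 : name = "Zero RB"
  · subst h1; simp [pvLabelsB, PySem.Dict.ofList, PySem.Dict.update, PySem.Dict.getD_insert]
  by_cases h2 : name = "Modified Zero RB"
  · subst h2; simp [pvLabelsB, PySem.Dict.ofList, PySem.Dict.update, PySem.Dict.getD_insert]
  by_cases h3 : name = "Hero RB"
  · subst h3; simp [pvLabelsB, PySem.Dict.ofList, PySem.Dict.update, PySem.Dict.getD_insert]
  by_cases h4 : name = "Robust RB"
  · subst h4; simp [pvLabelsB, PySem.Dict.ofList, PySem.Dict.update, PySem.Dict.getD_insert]
  by_cases h5 : name = "Hyper-Fragile RB"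
  · subst h5; simp [pvLabelsB, PySem.Dict.ofList, PySem.Dict.update, PySem.Dict.getD_insert]
  by_cases h6 : name = "WR-Heavy"
  · subst h6; simp [pvLabelsB, PySem.Dict.ofList, PySem.Dict.update, PySem.Dict.getD_insert]
  by_cases h7 : name = "Pocket QB"
  · subst h7; simp [pvLabelsB, PySem.Dict.ofList, PySem.Dict.update, PySem.Dict.getD_insert]
  by_cases h8 : name = "Bimodal RB"
  · subst h8; simp [pvLabelsB, PySem.Dict.ofList, PySem.Dict.update]
  · simp [pvLabelsB, PySem.Dict.ofList, PySem.Dict.update, PySem.Dict.getD_insert,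
      h1, h2, h3, h4, h5, h6, h7, h8]

lemma pvLabelA_eq_pvLabelsB (name : String) (rnd rb : Int) (k : Nat) (hk : k ≤ 5) :
    pvLabelA name rnd rb (rnd + k) = PySem.List.pyGetD (pvLabelsB name rb) (k : Int) "" := by
  rw [PySem.List.pyGetD_natCast, pvLabelsB_eq]
  unfold pvLabelA
  interval_cases k <;> split_ifs <;> first | rfl | omega

lemma pvA_items (name : String) (rnd total_rounds : Int) (my_counts : List (String × Int)) :
    make_base_plan_py name rnd total_rounds my_counts
      = (PySem.List.pyRange rnd (min total_rounds (rnd + 5) + 1) 1).map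
          (fun i => (i, pvLabelA name rnd ((PySem.Dict.mk my_counts).getD "RB" 0) i)) := by
  unfold make_base_plan_py
  dsimp only
  rw [show (fun (plan : PySem.Dict Int String) (i : Int) =>
      if name = "Zero RB" then
        plan.insert i (if i ≤ rnd + 3 then "WR/TE" else if i ≤ rnd + 5 then "RB upside" else "QB")
      else if name = "Modified Zero RB" then
        plan.insert i (if i ≤ rnd + 2 then "WR/TE" else if i ≤ rnd + 5 then "RB upside" else "QB")
      else if name = "Hero RB" then
        plan.insert i (if i = rnd ∧ (PySem.Dict.mk my_counts).getD "RB" 0 < 1 then "RB"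
                       else if i ≤ rnd + 3 then "WR/TE" else "QB")
      else if name = "Robust RB" then
        plan.insert i (if (i = rnd ∨ i = rnd + 1) ∧ (PySem.Dict.mk my_counts).getD "RB" 0 < 2 then "RB"
                       else if i ≤ rnd + 4 then "WR/TE" else "QB")
      else if name = "Hyper-Fragile RB" then
        (if (PySem.Dict.mk my_counts).getD "RB" 0 < 2 ∧ i ≤ rnd + 2 then plan.insert i "RB"
         else plan.insert i "WR/TE")
      else if name = "WR-Heavy" then
        plan.insert i (if i ≤ rnd + 2 then "WR" else if i ≤ rnd + 4 then "TE/RB" else "QB")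
      else if name = "Pocket QB" then
        plan.insert i (if i ≤ rnd + 6 then "WR/TE/RB" else "QB")
      else if name = "Bimodal RB" then
        plan.insert i (if i ≤ rnd + 2 then "WR/TE" else if i = rnd + 3 ∨ i = rnd + 4 then "RB" else "WR/TE")
      else
        plan.insert i (if i ≤ rnd + 3 then "Best Value (RB/WR/TE)" else "QB"))
      = fun (plan : PySem.Dict Int String) i =>
          plan.insert i (pvLabelA name rnd ((PySem.Dict.mk my_counts).getD "RB" 0) i) from by
    funext plan i
    unfold pvLabelA
    split_ifs <;> rfl]
  have h := PySem.Dict.items_foldl_insert_fresh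
      (d := PySem.Dict.empty)
      (l := PySem.List.pyRange rnd (min total_rounds (rnd + 5) + 1) 1)
      (k := fun i => i)
      (v := fun i => pvLabelA name rnd ((PySem.Dict.mk my_counts).getD "RB" 0) i)
      (by intro a _; simp) (by simpa using PySem.List.nodup_pyRange_one rnd (min total_rounds (rnd + 5) + 1))
  simpa using h

lemma pvB_items (name : String) (rnd total_rounds : Int) (my_counts : List (String × Int)) :
    make_base_plan_py_alt name rnd total_rounds my_counts
      = (PySem.List.pyRange 0 (min total_rounds (rnd + 5) - rnd + 1) 1).map
          (fun d => (rnd + d,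
            PySem.List.pyGetD (pvLabelsB name ((PySem.Dict.mk my_counts).getD "RB" 0)) d "")) := by
  unfold make_base_plan_py_alt pvLabelsB
  dsimp only
  have h := PySem.Dict.items_foldl_insert_fresh
      (d := PySem.Dict.empty)
      (l := PySem.List.pyRange 0 (min total_rounds (rnd + 5) - rnd + 1) 1)
      (k := fun d => rnd + d)
      (v := fun d => PySem.List.pyGetD (pvLabelsB name ((PySem.Dict.mk my_counts).getD "RB" 0)) d "")
      (by intro a _; simp)
      (by exact (PySem.List.nodup_pyRange_one 0 (min total_rounds (rnd + 5) - rnd + 1)).map (fun a b h => by omega))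
  unfold pvLabelsB at h
  simpa using h

-- ===== VERDICT (by name: the statement is the Claim_ definition above) =====
theorem make_base_plan_py_spec : Claim_equal_make_base_plan_py := by
  intro name rnd total_rounds my_counts _
  unfold Spec_make_base_plan_py
  rw [pvA_items, pvB_items]
  rw [PySem.List.pyRange_one, PySem.List.pyRange_one]
  have hn : (min total_rounds (rnd + 5) - rnd + 1 - 0).toNat
      = (min total_rounds (rnd + 5) + 1 - rnd).toNat := by omega
  rw [hn, List.map_map, List.map_map]
  apply List.map_congr_left
  intro k hk
  have hk5 : k ≤ 5 := by
    have := List.mem_range.mp hk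
    omega
  simp only [Function.comp]
  rw [pvLabelA_eq_pvLabelsB name rnd _ k hk5]
  norm_num
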